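-- pv_equiv track=rewrite | github.com/danny128373/LeetCode-Challenges | codewars/scramble.py | scramble
-- ===== SOURCE A (Python) =====
-- def scramble(s1, s2):
--     s1 = list(s1)
--     for letter in s2:
--         if letter in s1:
--             s1.remove(letter)
--         else:
--             return False
--     return True
-- ===== SOURCE B (Python) =====
-- def scramble(s1, s2):
--     xs = sorted(s1)
--     ys = sorted(s2)
--     i = j = 0
--     while i < len(xs) and j < len(ys):
--         if xs[i] == ys[j]:
--             j += 1
--         i += 1
--     return j == len(ys)
-- ===== Notes on version B (the rewrite author's own statement) =====
-- stated objective: faster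
-- what changed: B sorts both strings once and runs a two-pointer greedy merge over the two sorted lists (a subsequence check), replacing A's repeated membership-test-and-remove scan over a shrinking copy of s1.
import Mathlib
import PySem

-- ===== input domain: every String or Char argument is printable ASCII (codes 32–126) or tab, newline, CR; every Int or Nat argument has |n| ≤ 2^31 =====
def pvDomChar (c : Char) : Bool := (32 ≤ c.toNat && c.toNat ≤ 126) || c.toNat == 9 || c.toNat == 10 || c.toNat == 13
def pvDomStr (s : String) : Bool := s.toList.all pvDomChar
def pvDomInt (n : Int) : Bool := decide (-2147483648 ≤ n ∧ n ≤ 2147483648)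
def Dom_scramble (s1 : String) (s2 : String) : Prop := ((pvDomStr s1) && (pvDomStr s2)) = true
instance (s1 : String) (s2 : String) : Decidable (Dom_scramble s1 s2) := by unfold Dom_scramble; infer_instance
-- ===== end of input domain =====

-- B sorts both strings once and checks sorted s2 against sorted s1 with a two-pointer
-- greedy merge, replacing A's membership-test-and-remove scan (objective: faster).

-- ===== PORT A =====
-- loop over s2: membership test in the remaining list, then remove first occurrence
def scrambleGoA : List Char → List Char → Bool
  | _, [] => true
  | rem, letter :: rest =>
      if rem.contains letter then scrambleGoA (rem.erase letter) rest else false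

def scramble (s1 : String) (s2 : String) : Bool :=
  scrambleGoA s1.toList s2.toList

-- ===== PORT B =====
-- the while loop: i advances each step (drop head of xs); j advances on a match
-- (drop head of ys); when a pointer reaches its end, return j == len(ys)
def scrambleMergeB : List Char → List Char → Bool
  | _, [] => true
  | [], _ :: _ => false
  | x :: xs, y :: ys => if x == y then scrambleMergeB xs ys else scrambleMergeB xs (y :: ys)

def scramble_alt (s1 : String) (s2 : String) : Bool :=
  scrambleMergeB (PySem.List.sorted s1.toList (fun c => c) false)
                 (PySem.List.sorted s2.toList (fun c => c) false)

-- ===== PRECONDITION & SPEC =====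
def Spec_scramble (s1 : String) (s2 : String) (out : Bool) : Prop := out = scramble_alt s1 s2
instance (s1 : String) (s2 : String) (out : Bool) : Decidable (Spec_scramble s1 s2 out) := by unfold Spec_scramble; infer_instance

-- ===== CLAIM (what is proved, stated in full; the proofs are below) =====
def Claim_equal_scramble : Prop := ∀ (s1 : String) (s2 : String), Dom_scramble s1 s2 → Spec_scramble s1 s2 (scramble s1 s2)

-- ===== LEMMAS AND PROOFS =====

-- A's loop decides the sub-multiset relation
theorem scrambleGoA_iff_subperm (l : List Char) :
    ∀ rem : List Char, scrambleGoA rem l = true ↔ List.Subperm l rem := by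
  induction l with
  | nil => intro rem; simp [scrambleGoA, List.nil_subperm]
  | cons c rest ih =>
      intro rem
      simp only [scrambleGoA]
      by_cases hmem : c ∈ rem
      · have hperm : List.Perm rem (c :: rem.erase c) := List.perm_cons_erase hmem
        rw [if_pos (by simpa using hmem)]
        rw [ih (rem.erase c)]
        constructor
        · intro h
          exact (List.subperm_cons c |>.mpr h).trans hperm.symm.subperm
        · intro h
          exact (List.subperm_cons c).mp (h.trans hperm.subperm)
      · rw [if_neg (by simpa using hmem)]
        simp only [Bool.false_eq_true, false_iff]
        intro h
        exact hmem (h.subset (List.mem_cons_self))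

-- B's greedy merge decides the sublist relation (on any lists)
theorem scrambleMergeB_iff_sublist (xs : List Char) :
    ∀ ys : List Char, scrambleMergeB xs ys = true ↔ List.Sublist ys xs := by
  induction xs with
  | nil =>
      intro ys
      cases ys with
      | nil => simp [scrambleMergeB]
      | cons y ys => simp [scrambleMergeB]
  | cons x xs ih =>
      intro ys
      cases ys with
      | nil => simp [scrambleMergeB, List.nil_sublist]
      | cons y ys =>
          simp only [scrambleMergeB]
          by_cases hxy : x = y
          · subst hxy
            rw [if_pos (by simp), ih ys]
            exact (List.cons_sublist_cons).symm
          · rw [if_neg (by simpa using hxy), ih (y :: ys)]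
            constructor
            · intro h; exact h.cons x
            · intro h
              cases h with
              | cons _ h => exact h
              | cons₂ _ h => exact absurd rfl hxy

theorem scramble_eq_alt (s1 s2 : String) : scramble s1 s2 = scramble_alt s1 s2 := by
  rw [Bool.eq_iff_iff]
  unfold scramble scramble_alt
  rw [scrambleGoA_iff_subperm, scrambleMergeB_iff_sublist]
  have p1 : (PySem.List.sorted s1.toList (fun c => c) false).Perm s1.toList :=
    PySem.List.sorted_perm _ _ _
  have p2 : (PySem.List.sorted s2.toList (fun c => c) false).Perm s2.toList :=
    PySem.List.sorted_perm _ _ _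
  constructor
  · intro h
    exact List.sublist_of_subperm_of_pairwise
      ((p2.subperm.trans h).trans p1.symm.subperm)
      (by simpa using PySem.List.sorted_pairwise s2.toList (fun c => c))
      (by simpa using PySem.List.sorted_pairwise s1.toList (fun c => c))
  · intro h
    exact p2.symm.subperm.trans (h.subperm.trans p1.subperm)

-- ===== VERDICT (by name: the statement is the Claim_ definition above) =====
theorem scramble_spec : Claim_equal_scramble := by
  intro s1 s2 _
  exact scramble_eq_alt s1 s2
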